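-- pv_equiv track=rewrite | github.com/lucyyangloveslife/coursera_algorithmic_toolbox | Algorithmic Toolbox/week1_programming_challenges/2_maximum_pairwise_product/max_pairwise_product.py | max_pairwise_product_v1
-- ===== SOURCE A (Python) =====
-- def max_pairwise_product_v1(numbers):
--
--     n = len(numbers) #lenth of the list
--     max_product = 0 #keep track of the maximum product found so far
--
--     # double loop to find maximum product
--     for first in range(n): # goes through each number using index first
--         for second in range(first + 1, n): # goes through all the numbers after first (pairs are not repeated and no number is multiplied by itself)
--
--     # max updates max_product to be the highest product so far
--             max_product = max(max_product,
--                 numbers[first] * numbers[second])  # computes the product of 2 different numbers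
--
--     return max_product
-- ===== SOURCE B (Python) =====
-- def max_pairwise_product_v1(numbers):
--     # One pass: keep the running max and min of the prefix; for each new x the
--     # best pair ending at x is x*hi or x*lo.  Result is max(0, best pair).
--     best = 0
--     hi = None
--     lo = None
--     for x in numbers:
--         if hi is None:
--             hi = x
--             lo = x
--         else:
--             best = max(best, x * hi, x * lo)
--             hi = max(hi, x)
--             lo = min(lo, x)
--     return best
-- ===== Notes on version B (the rewrite author's own statement) =====
-- stated objective: faster
-- what changed: Replaced the O(n^2) double loop over all index pairs by a single pass that keeps the running maximum and minimum of the prefix and combines each new element with them (best = max(best, x*hi, x*lo)).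
import Mathlib
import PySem

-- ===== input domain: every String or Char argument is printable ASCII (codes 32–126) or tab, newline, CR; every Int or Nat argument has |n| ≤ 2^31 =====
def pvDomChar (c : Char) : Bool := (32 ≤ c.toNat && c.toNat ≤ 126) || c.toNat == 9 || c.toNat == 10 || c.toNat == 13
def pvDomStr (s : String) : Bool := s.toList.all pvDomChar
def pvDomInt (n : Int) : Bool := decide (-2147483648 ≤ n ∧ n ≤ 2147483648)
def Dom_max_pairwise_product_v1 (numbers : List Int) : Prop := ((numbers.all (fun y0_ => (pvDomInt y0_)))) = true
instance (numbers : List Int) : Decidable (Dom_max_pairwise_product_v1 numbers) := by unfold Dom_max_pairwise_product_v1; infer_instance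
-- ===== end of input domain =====

-- B replaces A's O(n^2) double loop by a single pass keeping the running max/min of the prefix (objective: faster).

-- ===== PORT A =====
def max_pairwise_product_v1 (numbers : List Int) : Int :=
  let n : Int := numbers.length
  (PySem.List.pyRange 0 n 1).foldl
    (fun max_product first =>
      (PySem.List.pyRange (first + 1) n 1).foldl
        (fun mp second =>
          max mp (PySem.List.pyGetD numbers first 0 * PySem.List.pyGetD numbers second 0))
        max_product)
    0

-- ===== PORT B =====
-- loop of Source B: state = (best, hi/lo of the elements seen so far; none before the first element)
def pvAltGo : List Int → Int → Option (Int × Int) → Int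
  | [], best, _ => best
  | x :: rest, best, none => pvAltGo rest best (some (x, x))
  | x :: rest, best, some (h, l) =>
      pvAltGo rest (max (max best (x * h)) (x * l)) (some (max h x, min l x))

def max_pairwise_product_v1_alt (numbers : List Int) : Int :=
  pvAltGo numbers 0 none

-- ===== PRECONDITION & SPEC =====
def Spec_max_pairwise_product_v1 (numbers : List Int) (out : Int) : Prop := out = max_pairwise_product_v1_alt numbers
instance (numbers : List Int) (out : Int) : Decidable (Spec_max_pairwise_product_v1 numbers out) := by unfold Spec_max_pairwise_product_v1; infer_instance

-- ===== CLAIM (what is proved, stated in full; the proofs are below) =====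
def Claim_equal_max_pairwise_product_v1 : Prop := ∀ (numbers : List Int), Dom_max_pairwise_product_v1 numbers → Spec_max_pairwise_product_v1 numbers (max_pairwise_product_v1 numbers)

-- ===== LEMMAS AND PROOFS =====

-- the list of all pairwise products numbers[i]*numbers[j], i < j, in A's enumeration order
def pvPairs : List Int → List Int
  | [] => []
  | x :: r => r.map (x * ·) ++ pvPairs r

lemma pvPairs_snoc_perm (x : Int) : ∀ l : List Int, (pvPairs (l ++ [x])).Perm (pvPairs l ++ l.map (x * ·))
  | [] => by simp [pvPairs]
  | y :: l => by
    have ih := pvPairs_snoc_perm x l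
    simp only [List.cons_append, pvPairs, List.map_append, List.map_cons, List.map_nil,
      List.map_cons]
    refine (List.Perm.append_left _ ih).trans ?_
    rw [mul_comm y x]
    simp only [List.append_assoc, List.singleton_append]
    exact List.Perm.append_left _ List.perm_middle.symm

lemma le_foldl_mulmax (x : Int) : ∀ (p : List Int) (a : Int), a ≤ p.foldl (fun b y => max b (x * y)) a
  | [], _ => le_refl _
  | y :: p, a => le_trans (le_max_left a (x * y)) (le_foldl_mulmax x p _)

lemma mem_le_foldl_mulmax (x : Int) : ∀ (p : List Int) (a y : Int), y ∈ p →
    x * y ≤ p.foldl (fun b z => max b (x * z)) a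
  | y' :: p, a, y, hy => by
    rcases List.mem_cons.mp hy with h | h
    · subst h
      exact le_trans (le_max_right a (x * y)) (le_foldl_mulmax x p _)
    · exact mem_le_foldl_mulmax x p _ y h

lemma foldl_mulmax_le (x : Int) : ∀ (p : List Int) (a c : Int), a ≤ c → (∀ y ∈ p, x * y ≤ c) →
    p.foldl (fun b y => max b (x * y)) a ≤ c
  | [], _, _, ha, _ => ha
  | y :: p, a, c, ha, h => by
    refine foldl_mulmax_le x p _ c (max_le ha (h y (List.mem_cons_self ..))) ?_
    exact fun z hz => h z (List.mem_cons_of_mem _ hz)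

lemma foldl_mulmax_eq (x a h l : Int) (p : List Int) (hh : h ∈ p) (hl : l ∈ p)
    (hub : ∀ y ∈ p, y ≤ h) (hlb : ∀ y ∈ p, l ≤ y) :
    p.foldl (fun b y => max b (x * y)) a = max (max a (x * h)) (x * l) := by
  apply le_antisymm
  · refine foldl_mulmax_le x p a _ (le_trans (le_max_left _ _) (le_max_left _ _)) ?_
    intro y hy
    rcases le_total 0 x with hx | hx
    · exact le_trans (mul_le_mul_of_nonneg_left (hub y hy) hx)
        (le_trans (le_max_right a (x * h)) (le_max_left _ _))
    · exact le_trans (mul_le_mul_of_nonpos_left (hlb y hy) hx) (le_max_right _ _)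
  · exact max_le (max_le (le_foldl_mulmax x p a) (mem_le_foldl_mulmax x p a h hh))
      (mem_le_foldl_mulmax x p a l hl)

lemma pairs_foldl_snoc (p : List Int) (x a : Int) :
    (pvPairs (p ++ [x])).foldl max a
      = p.foldl (fun b y => max b (x * y)) ((pvPairs p).foldl max a) := by
  rw [List.Perm.foldl_op_eq (pvPairs_snoc_perm x p), List.foldl_append, List.foldl_map]

lemma pvAltGo_inv : ∀ (r p : List Int) (a h l : Int), h ∈ p → l ∈ p →
    (∀ y ∈ p, y ≤ h) → (∀ y ∈ p, l ≤ y) →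
    pvAltGo r ((pvPairs p).foldl max a) (some (h, l)) = (pvPairs (p ++ r)).foldl max a
  | [], p, a, h, l, _, _, _, _ => by simp [pvAltGo]
  | x :: r, p, a, h, l, hh, hl, hub, hlb => by
    show pvAltGo r (max (max ((pvPairs p).foldl max a) (x * h)) (x * l))
        (some (max h x, min l x)) = _
    have hfold : max (max ((pvPairs p).foldl max a) (x * h)) (x * l)
        = (pvPairs (p ++ [x])).foldl max a := by
      rw [pairs_foldl_snoc]
      exact (foldl_mulmax_eq x _ h l p hh hl hub hlb).symm
    rw [hfold]
    have hh' : max h x ∈ p ++ [x] := by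
      rcases max_choice h x with hc | hc <;> rw [hc]
      · exact List.mem_append_left _ hh
      · exact List.mem_append_right _ (List.mem_singleton_self x)
    have hl' : min l x ∈ p ++ [x] := by
      rcases min_choice l x with hc | hc <;> rw [hc]
      · exact List.mem_append_left _ hl
      · exact List.mem_append_right _ (List.mem_singleton_self x)
    have hub' : ∀ y ∈ p ++ [x], y ≤ max h x := by
      intro y hy
      rcases List.mem_append.mp hy with hy | hy
      · exact le_trans (hub y hy) (le_max_left _ _)
      · rw [List.mem_singleton.mp hy]; exact le_max_right _ _
    have hlb' : ∀ y ∈ p ++ [x], min l x ≤ y := by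
      intro y hy
      rcases List.mem_append.mp hy with hy | hy
      · exact le_trans (min_le_left _ _) (hlb y hy)
      · rw [List.mem_singleton.mp hy]; exact min_le_right _ _
    have := pvAltGo_inv r (p ++ [x]) a (max h x) (min l x) hh' hl' hub' hlb'
    simpa using this

lemma alt_eq_pairs (numbers : List Int) :
    max_pairwise_product_v1_alt numbers = (pvPairs numbers).foldl max 0 := by
  cases numbers with
  | nil => simp [max_pairwise_product_v1_alt, pvAltGo, pvPairs]
  | cons x r =>
    show pvAltGo r 0 (some (x, x)) = _
    have := pvAltGo_inv r [x] 0 x x (by simp) (by simp) (by simp) (by simp)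
    simpa [pvPairs] using this

lemma a_outer (numbers : List Int) (k : Nat) (acc : Int) :
    (PySem.List.pyRange (k : Int) (numbers.length : Int) 1).foldl
      (fun max_product first =>
        (PySem.List.pyRange (first + 1) (numbers.length : Int) 1).foldl
          (fun mp second =>
            max mp (PySem.List.pyGetD numbers first 0 * PySem.List.pyGetD numbers second 0))
          max_product)
      acc = (pvPairs (numbers.drop k)).foldl max acc := by
  by_cases hk : k < numbers.length
  · rw [PySem.List.pyRange_one_cons (by exact_mod_cast hk), List.foldl_cons]
    have hinner : (PySem.List.pyRange ((k : Int) + 1) (numbers.length : Int) 1).foldl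
        (fun mp second =>
          max mp (PySem.List.pyGetD numbers (k : Int) 0 * PySem.List.pyGetD numbers second 0))
        acc
        = (numbers.drop (k + 1)).foldl
            (fun mp y => max mp (numbers[k] * y)) acc := by
      have h1 := PySem.List.foldl_pyRange_pyGetD' numbers 0
        (fun mp y => max mp (PySem.List.pyGetD numbers (k : Int) 0 * y)) acc
        (a := (k : Int) + 1) (by positivity)
      have h2 : (((k : Int) + 1)).toNat = k + 1 := by omega
      rw [h2] at h1
      rw [h1, PySem.List.pyGetD_natCast, List.getD_eq_getElem _ _ hk]
    rw [hinner]
    have ih := a_outer numbers (k + 1) ((numbers.drop (k + 1)).foldl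
      (fun mp y => max mp (numbers[k] * y)) acc)
    push_cast at ih
    rw [ih]
    rw [List.drop_eq_getElem_cons hk]
    show _ = (pvPairs (numbers[k] :: numbers.drop (k + 1))).foldl max acc
    rw [show pvPairs (numbers[k] :: numbers.drop (k + 1))
          = (numbers.drop (k + 1)).map (numbers[k] * ·) ++ pvPairs (numbers.drop (k + 1)) from rfl,
      List.foldl_append, List.foldl_map]
  · rw [PySem.List.pyRange_one_eq_nil (by exact_mod_cast Nat.le_of_not_lt hk),
      List.drop_eq_nil_of_le (Nat.le_of_not_lt hk)]
    rfl
termination_by numbers.length - k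
decreasing_by omega

lemma a_eq_pairs (numbers : List Int) :
    max_pairwise_product_v1 numbers = (pvPairs numbers).foldl max 0 := by
  show (PySem.List.pyRange 0 (numbers.length : Int) 1).foldl _ 0 = _
  have := a_outer numbers 0 0
  simpa using this

-- ===== VERDICT (by name: the statement is the Claim_ definition above) =====
theorem max_pairwise_product_v1_spec : Claim_equal_max_pairwise_product_v1 := by
  intro numbers _
  unfold Spec_max_pairwise_product_v1
  rw [a_eq_pairs, alt_eq_pairs]
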